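-- pv_equiv track=rewrite | github.com/serotonins/ctpo | src/programmers/12938/jh_최고의_집합.py | solution
-- ===== SOURCE A (Python) =====
-- def solution(n, s):
--     answer = []
--
--     if s<n:
--         answer.append(-1)
--         return answer
--
--     base = s//n
--     plus = s%n
--
--     answer = [base]*n
--     for i in range(plus):
--         answer[-1-i]+=1
--
--     return answer
-- ===== SOURCE B (Python) =====
-- def solution(n, s):
--     if s < n:
--         return [-1]
--     answer = []
--     remaining, k = s, n
--     while k > 0:
--         x = -(-remaining // k)  # ceiling: the largest value still needed
--         answer.append(x)
--         remaining -= x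
--         k -= 1
--     answer.reverse()
--     return answer
-- ===== Notes on version B (the rewrite author's own statement) =====
-- stated objective: alternative
-- what changed: Replaces A's divmod-then-bump-the-tail construction with a greedy single pass that repeatedly appends the ceiling of the remaining sum over the remaining count and subtracts it, then reverses.
import Mathlib
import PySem

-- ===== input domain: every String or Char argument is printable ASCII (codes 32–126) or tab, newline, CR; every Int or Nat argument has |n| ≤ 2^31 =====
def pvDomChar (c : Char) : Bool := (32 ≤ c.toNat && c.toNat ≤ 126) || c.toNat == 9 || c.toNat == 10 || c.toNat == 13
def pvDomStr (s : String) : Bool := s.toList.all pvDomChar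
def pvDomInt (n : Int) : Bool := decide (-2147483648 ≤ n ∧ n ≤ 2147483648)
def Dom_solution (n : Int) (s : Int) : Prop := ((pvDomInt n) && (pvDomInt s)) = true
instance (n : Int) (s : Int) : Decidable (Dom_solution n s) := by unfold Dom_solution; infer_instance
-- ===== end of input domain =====

-- B builds the answer greedily in one pass — append ceil(remaining/k) and subtract it —
-- instead of A's divmod plus an in-place bump of the tail (objective: alternative).

-- ===== PORT A =====
def solution (n : Int) (s : Int) : List Int :=
  if s < n then [-1]
  else
    let base := PySem.Int.floordiv s n
    let plus := PySem.Int.mod s n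
    let answer := List.replicate n.toNat base
    (PySem.List.pyRange 0 plus 1).foldl
      (fun ans i => PySem.List.pySetD ans (-1 - i) (PySem.List.pyGetD ans (-1 - i) 0 + 1))
      answer

-- ===== PORT B =====
-- the while-loop of Source B: state (remaining, k, answer), one iteration per k > 0
def solAltLoop (remaining k : Int) (acc : List Int) : List Int :=
  if h : 0 < k then
    let x := -(PySem.Int.floordiv (-remaining) k)
    solAltLoop (remaining - x) (k - 1) (acc ++ [x])
  else acc
termination_by k.toNat
decreasing_by omega

def solution_alt (n : Int) (s : Int) : List Int :=
  if s < n then [-1]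
  else (solAltLoop s n []).reverse

-- ===== PRECONDITION & SPEC =====
-- Pre_ excludes exactly the inputs with n = 0 and s ≥ n, where A's s//n raises ZeroDivisionError.
def Pre_solution (n : Int) (s : Int) : Prop := n ≠ 0 ∨ s < n
instance (n : Int) (s : Int) : Decidable (Pre_solution n s) := by unfold Pre_solution; infer_instance
def pvWitness_solution : Int × Int := (5, 11)

def Spec_solution (n : Int) (s : Int) (out : List Int) : Prop := out = solution_alt n s
instance (n : Int) (s : Int) (out : List Int) : Decidable (Spec_solution n s out) := by unfold Spec_solution; infer_instance

-- ===== CLAIM (what is proved, stated in full; the proofs are below) =====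
def Claim_equal_solution : Prop := ∀ (n : Int) (s : Int), Dom_solution n s → Pre_solution n s → Spec_solution n s (solution n s)

-- ===== LEMMAS AND PROOFS =====

-- pySetD with a negative index: xs[-k] = v sets position len-k (exact Python rule).
theorem pySetD_neg_natCast {α : Type} (xs : List α) (k : Nat) (v : α)
    (h1 : 0 < k) (h2 : k ≤ xs.length) :
    PySem.List.pySetD xs (-(k:Int)) v = xs.set (xs.length - k) v := by
  have hidx : PySem.List.pyIdx? xs.length (-(k:Int)) = some (xs.length - k) := by
    unfold PySem.List.pyIdx?
    rw [if_neg (by omega), if_pos (by omega)]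
    simp
  simp only [PySem.List.pySetD, PySem.List.pySet?, hidx, Option.map_some, Option.getD_some]

-- A's loop invariant: after p bumps on [base]*nn, the last p entries are base+1.
theorem bump_loop (base : Int) (nn p : Nat) (hp : p ≤ nn) :
    (PySem.List.pyRange 0 (p:Int) 1).foldl
      (fun ans i => PySem.List.pySetD ans (-1 - i) (PySem.List.pyGetD ans (-1 - i) 0 + 1))
      (List.replicate nn base)
    = List.replicate (nn - p) base ++ List.replicate p (base + 1) := by
  induction p with
  | zero => simp [PySem.List.pyRange_one_eq_nil]
  | succ p ih =>
    have hcast : ((p+1 : Nat) : Int) = (p:Int) + 1 := by push_cast; ring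
    rw [hcast, PySem.List.pyRange_one_succ_right (by positivity), List.foldl_append,
        ih (by omega)]
    simp only [List.foldl_cons, List.foldl_nil]
    set L := List.replicate (nn - p) base ++ List.replicate p (base + 1) with hL
    have hlen : L.length = nn := by simp [hL]; omega
    have hidx : (-1 - (p:Int)) = -((p+1 : Nat) : Int) := by push_cast; ring
    have hget : PySem.List.pyGetD L (-1 - (p:Int)) 0 = base := by
      rw [hidx, PySem.List.pyGetD_neg_natCast _ _ _ (by omega) (by omega)]
      have hlt : L.length - (p+1) < nn - p := by omega
      rw [List.getElem_append_left (by simp [hL]; omega)]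
      simp
    rw [hget, hidx, pySetD_neg_natCast L (p+1) (base+1) (by omega) (by omega), hL, hlen]
    have hsplit : List.replicate (nn - p) base
        = List.replicate (nn - (p+1)) base ++ [base] := by
      have : nn - p = (nn - (p+1)) + 1 := by omega
      rw [this, List.replicate_succ']
    rw [hsplit, List.append_assoc, List.set_append_right _ _ (by simp)]
    simp [List.replicate_succ]

-- the loop returns the accumulator unchanged once k ≤ 0
theorem solAltLoop_nonpos (r k : Int) (acc : List Int) (hk : ¬ 0 < k) :
    solAltLoop r k acc = acc := by
  rw [solAltLoop]; simp [hk]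

-- the loop is accumulator-homomorphic
theorem solAltLoop_acc (remaining k : Int) (acc : List Int) :
    solAltLoop remaining k acc = acc ++ solAltLoop remaining k [] := by
  induction hm : k.toNat generalizing remaining k acc with
  | zero =>
    rw [solAltLoop_nonpos _ _ _ (by omega), solAltLoop_nonpos _ _ _ (by omega)]
    simp
  | succ m ih =>
    have hk : 0 < k := by omega
    conv_lhs => rw [solAltLoop]
    conv_rhs => rw [solAltLoop]
    simp only [dif_pos hk]
    rw [ih _ _ _ (by omega)]
    conv_rhs => rw [ih _ _ _ (by omega)]
    simp

-- B's loop: for k > 0 it produces r%k copies of r//k + 1 followed by the rest r//k.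
theorem solAltLoop_closed (k : Int) (r : Int) (hk : 0 < k) :
    solAltLoop r k []
      = List.replicate (PySem.Int.mod r k).toNat (PySem.Int.floordiv r k + 1)
        ++ List.replicate (k.toNat - (PySem.Int.mod r k).toNat) (PySem.Int.floordiv r k) := by
  induction hm : k.toNat generalizing r k with
  | zero => omega
  | succ m ih =>
    have hdec := PySem.Int.floordiv_mul_add_mod r k
    have hp0 : 0 ≤ PySem.Int.mod r k := PySem.Int.mod_nonneg r hk
    have hplt : PySem.Int.mod r k < k := PySem.Int.mod_lt r hk
    set b := PySem.Int.floordiv r k with hb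
    set p := PySem.Int.mod r k with hp
    have hx : -(PySem.Int.floordiv (-r) k) = if p = 0 then b else b + 1 := by
      rcases eq_or_lt_of_le hp0 with h0 | h0
      · rw [if_pos h0.symm, PySem.Int.neg_floordiv_neg_eq_iff_of_pos hk]
        constructor <;> nlinarith
      · rw [if_neg (by omega), PySem.Int.neg_floordiv_neg_eq_iff_of_pos hk]
        constructor <;> nlinarith
    rw [solAltLoop]
    simp only [dif_pos hk]
    rw [solAltLoop_acc, hx]
    by_cases hk1 : 0 < k - 1
    · -- at least one more iteration: remaining r - x has quotient b and remainder p or p-1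
      by_cases hp0' : p = 0
      · have hfd : PySem.Int.floordiv (r - b) (k - 1) = b := by
          rw [PySem.Int.floordiv_eq_iff_of_pos hk1]
          constructor <;> nlinarith [hdec, hp0' ▸ hp]
        have hmod : PySem.Int.mod (r - b) (k - 1) = 0 := by
          have h := PySem.Int.floordiv_mul_add_mod (r - b) (k - 1)
          rw [hfd] at h; nlinarith [hdec, hp0' ▸ hp]
        rw [if_pos hp0', ih (k - 1) (r - b) hk1 (by omega), hfd, hmod, hp0']
        simp [List.replicate_succ]
      · have hppos : 0 < p := lt_of_le_of_ne hp0 (Ne.symm hp0')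
        have hfd : PySem.Int.floordiv (r - (b + 1)) (k - 1) = b := by
          rw [PySem.Int.floordiv_eq_iff_of_pos hk1]
          constructor <;> nlinarith
        have hmod : PySem.Int.mod (r - (b + 1)) (k - 1) = p - 1 := by
          have h := PySem.Int.floordiv_mul_add_mod (r - (b + 1)) (k - 1)
          rw [hfd] at h; nlinarith
        rw [if_neg hp0', ih (k - 1) (r - (b + 1)) hk1 (by omega), hfd, hmod]
        have h1 : p.toNat = (p - 1).toNat + 1 := by omega
        have h2 : m + 1 - ((p - 1).toNat + 1) = m - (p - 1).toNat := by omega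
        rw [h1, h2, List.replicate_succ]
        simp
    · -- last iteration: k = 1, so b = r and p = 0
      have hk1' : k = 1 := by omega
      have hb1 : b = r := by
        rw [hb, hk1', PySem.Int.floordiv_eq_iff_of_pos (by norm_num)]
        constructor <;> nlinarith
      have hp1 : p = 0 := by nlinarith [hdec, hk1', hb1]
      rw [solAltLoop_nonpos _ _ _ hk1, if_pos hp1, hp1, hb1]
      have hm0 : m = 0 := by omega
      simp [hm0]

-- ===== VERDICT (by name: the statement is the Claim_ definition above) =====
theorem solution_spec : Claim_equal_solution := by
  intro n s _ hpre
  unfold Spec_solution solution solution_alt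
  by_cases hs : s < n
  · simp [hs]
  · simp only [if_neg hs]
    have hn0 : n ≠ 0 := by
      rcases hpre with h | h
      · exact h
      · exact absurd h hs
    rcases lt_or_gt_of_ne hn0 with hneg | hpos
    · -- n < 0: A builds the empty list and bumps nothing; B's loop never runs
      have hb := PySem.Int.mod_neg_bounds (a := s) hneg
      rw [PySem.List.pyRange_one_eq_nil (by omega)]
      have h1 : n.toNat = 0 := by omega
      rw [solAltLoop_nonpos _ _ _ (by omega)]
      simp [h1]
    · have h0 : 0 ≤ PySem.Int.mod s n := PySem.Int.mod_nonneg s hpos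
      have hlt : PySem.Int.mod s n < n := PySem.Int.mod_lt s hpos
      have hc : PySem.Int.mod s n = (((PySem.Int.mod s n).toNat : Nat) : Int) := by omega
      rw [hc, bump_loop _ _ _ (by omega), solAltLoop_closed n s hpos,
          List.reverse_append, List.reverse_replicate, List.reverse_replicate]
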